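-- pv_equiv track=rewrite | github.com/L0ckR/kp_dm_2sem | 8kp.py | seek_subtree
-- ===== SOURCE A (Python) =====
-- def parse_graph(graph_edges_list):
--     nodes = []
--     income = {}
--     outcome = {}
--
--     for i,j in graph_edges_list:
--         outcome [i]  = outcome.get(i, []) + [j]
--         income [j] = income.get(j, []) + [i]
--         if not i in nodes :
--             nodes += [i]
--         if not j in nodes :
--             nodes += [j]
--
--     return (nodes, income, outcome)
--
-- def is_tree(graph_edges_list, root):
--     nodes, income, outcome = parse_graph(graph_edges_list)
--     if sum( [ len(j) for j in outcome.values() ] )!=len(nodes) - 1 :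
--         return False
--
--     def visit_outcome(r, visited):
--         if r in visited:
--             return False
--         visited += [r]
--         if r in outcome:
--             for j in outcome[r]:
--                 if not visit_outcome(j, visited):
--                     return False
--         return True
--
--     visited = []
--     if not visit_outcome(root, visited):
--         return False
--     return sorted(visited)==sorted(nodes)
--
-- def clusters_join(clusters, a, b ):
--     clustter_a = [ i for i in clusters if a in i ][0]
--     clustter_b = [ i for i in clusters if b in i ][0]
--     if clustter_a != clustter_b :
--         return [ i for i in clusters if (a not in i) and (b not in i) ] + [ clustter_a + clustter_b ]
--     else:
--         return [i for i in clusters]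
--
-- def clusters_check(clusters, a, b ):
--     for i in clusters :
--         if a in i :
--             return not (b in i)
--     return False
--
-- def seek_subtree(graph_edges_list):
--     nodes, income, outcome = parse_graph(graph_edges_list)
--     result = []
--
--     possible_roots = [ i for i in nodes if not i in income ]
--     if len(possible_roots) > 1 :
--         return [] # no solutions.
--     if len(possible_roots) ==0 :
--         possible_roots = [i for i in nodes]
--
--     for root in possible_roots:
--         non_root_nodex = [ i for i in nodes if i!=root ]
--         non_root_nodex = sorted( non_root_nodex, key = lambda i : len(income[i]) )
--
--         clusters = nodes.copy()
--
--         def visit_left_node( left_nodes, clusters, edges ):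
--             if len(left_nodes) == 0 :
--                 if is_tree(edges, root):
--                     return [ edges ]
--             else:
--                 b = left_nodes[0]
--                 result = []
--                 for a in income[b]:
--                     if clusters_check(clusters, a, b):
--                         result += visit_left_node( left_nodes[1:], clusters_join(clusters, a,b),  edges+[a+b],  )
--                 return result
--
--         result  = visit_left_node( non_root_nodex, nodes, []  )
--
--     return result
-- ===== SOURCE B (Python) =====
-- # B: single search for the effective (last surviving) root, done as a
-- # breadth-first frontier expansion over component-labelled partial states
-- # instead of A's per-root recursive backtracking over string clusters.
-- def parse_graph(graph_edges_list):
--     nodes = []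
--     income = {}
--     outcome = {}
--     for i, j in graph_edges_list:
--         outcome[i] = outcome.get(i, []) + [j]
--         income[j] = income.get(j, []) + [i]
--         if not i in nodes:
--             nodes += [i]
--         if not j in nodes:
--             nodes += [j]
--     return (nodes, income, outcome)
--
--
-- def is_tree(graph_edges_list, root):
--     nodes, income, outcome = parse_graph(graph_edges_list)
--     if sum([len(j) for j in outcome.values()]) != len(nodes) - 1:
--         return False
--
--     def visit_outcome(r, visited):
--         if r in visited:
--             return False
--         visited += [r]
--         if r in outcome:
--             for j in outcome[r]:
--                 if not visit_outcome(j, visited):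
--                     return False
--         return True
--
--     visited = []
--     if not visit_outcome(root, visited):
--         return False
--     return sorted(visited) == sorted(nodes)
--
--
-- def seek_subtree(graph_edges_list):
--     nodes, income, outcome = parse_graph(graph_edges_list)
--
--     sources = [i for i in nodes if i not in income]
--     if len(sources) > 1:
--         return []  # no solutions.
--     if not nodes:
--         return []
--     # A recomputes and overwrites `result` for every candidate root, so only
--     # the last candidate's result survives: search that root only.
--     root = sources[0] if sources else nodes[-1]
--
--     order = sorted([i for i in nodes if i != root], key=lambda i: len(income[i]))
--
--     # breadth-first frontier: each state = (component labelling, chosen edges)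
--     states = [({n: n for n in nodes}, [])]
--     for b in order:
--         new_states = []
--         for comp, edges in states:
--             for a in income[b]:
--                 ca, cb = comp[a], comp[b]
--                 if ca != cb:
--                     merged = {n: (cb if c == ca else c) for n, c in comp.items()}
--                     new_states.append((merged, edges + [a + b]))
--         states = new_states
--
--     return [edges for comp, edges in states if is_tree(edges, root)]
-- ===== Notes on version B (the rewrite author's own statement) =====
-- stated objective: alternative
-- what changed: B searches only the effective root (A recomputes and overwrites `result` for every candidate root, so only the last one's result survives) and enumerates the parent choices breadth-first, expanding a frontier of (component-labelling, chosen-edges) partial states level by level with an is_tree filter at the end, instead of A's per-root recursive depth-first backtracking over a list of concatenated cluster strings probed by substring tests.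
-- outside the precondition, e.g. on seek_subtree([('x', 'x')]): A returns None, B returns []; on seek_subtree([('ab', 'b')]): A returns [], B raises ValueError
import Mathlib
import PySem

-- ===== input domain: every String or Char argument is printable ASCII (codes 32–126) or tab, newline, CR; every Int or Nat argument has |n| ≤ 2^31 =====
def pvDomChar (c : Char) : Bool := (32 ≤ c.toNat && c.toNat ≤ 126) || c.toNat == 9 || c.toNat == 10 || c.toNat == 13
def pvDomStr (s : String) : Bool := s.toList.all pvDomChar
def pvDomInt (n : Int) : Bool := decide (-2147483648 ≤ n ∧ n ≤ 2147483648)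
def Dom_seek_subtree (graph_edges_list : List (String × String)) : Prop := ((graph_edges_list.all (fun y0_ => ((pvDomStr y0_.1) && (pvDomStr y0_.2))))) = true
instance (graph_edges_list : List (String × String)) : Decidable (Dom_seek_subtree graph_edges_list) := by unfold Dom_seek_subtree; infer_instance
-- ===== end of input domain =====

-- B searches only the last surviving root (A overwrites `result` per root) and
-- enumerates parent choices by a breadth-first frontier of component-labelled
-- partial states instead of A's per-root recursive backtracking over string
-- clusters (objective: alternative).

-- ===== PORT A =====
-- Python string concatenation a+b (kernel-transparent, via toList)
def strAdd (a b : String) : String := String.ofList (a.toList ++ b.toList)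

-- shared module helper parse_graph (identical in Source A and Source B)
def parse_graph (l : List (String × String)) :
    List String × PySem.Dict String (List String) × PySem.Dict String (List String) :=
  l.foldl
    (fun st p =>
      let outcome := st.2.2.insert p.1 (st.2.2.getD p.1 [] ++ [p.2])
      let income := st.2.1.insert p.2 (st.2.1.getD p.2 [] ++ [p.1])
      let nodes := if p.1 ∈ st.1 then st.1 else st.1 ++ [p.1]
      let nodes := if p.2 ∈ nodes then nodes else nodes ++ [p.2]
      (nodes, income, outcome))
    ([], PySem.Dict.empty, PySem.Dict.empty)

-- `for i, j in edges` over 2-char edge strings: tuple-unpacking of a string.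
-- Python raises ValueError when the length is not 2 (unreached under Pre_).
def unpack2 (s : String) : String × String :=
  match s.toList with
  | [c, d] => (String.ofList [c], String.ofList [d])
  | _ => ("", "")

-- inner def visit_outcome of is_tree, with the mutable `visited` threaded through;
-- fuel only guards termination (Python's recursion depth is bounded by the visited set)
def visit_outcome (outcome : PySem.Dict String (List String)) :
    Nat → String → List String → Bool × List String
  | 0, _, visited => (false, visited)
  | fuel + 1, r, visited =>
    if r ∈ visited then (false, visited)
    else
      let visited := visited ++ [r]
      if outcome.contains r then
        (outcome.getD r []).foldl
          (fun st j => if st.1 then visit_outcome outcome fuel j st.2 else st)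
          (true, visited)
      else (true, visited)

-- shared module helper is_tree (identical in Source A and Source B), on edge strings
def is_tree (edges : List String) (root : String) : Bool :=
  let parsed := parse_graph (edges.map unpack2)
  if ((parsed.2.2.values.map (fun j => (j.length : Int))).sum ≠ (parsed.1.length : Int) - 1) then false
  else
    let res := visit_outcome parsed.2.2 (edges.length * 2 + 2) root []
    if !res.1 then false
    else decide (PySem.List.sorted res.2 (fun x => x) false = PySem.List.sorted parsed.1 (fun x => x) false)

def clusters_check : List String → String → String → Bool
  | [], _, _ => false
  | i :: rest, a, b => if PySem.Str.isIn a i then !(PySem.Str.isIn b i) else clusters_check rest a b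

def clusters_join (clusters : List String) (a b : String) : List String :=
  -- [ i for i in clusters if a in i ][0] ; headD "" is the IndexError guard (unreached under Pre_)
  let ca := (clusters.filter (fun i => PySem.Str.isIn a i)).headD ""
  let cb := (clusters.filter (fun i => PySem.Str.isIn b i)).headD ""
  if ca ≠ cb then
    (clusters.filter (fun i => !(PySem.Str.isIn a i) && !(PySem.Str.isIn b i))) ++ [strAdd ca cb]
  else clusters

-- inner def visit_left_node of A.  At an empty left list Python returns [edges]
-- or the implicit None (ported as `none`); at `result += visit_left_node(...)`
-- a None summand makes Python raise TypeError — that exception path is denoted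
-- as contributing nothing (unreached under Pre_).
def visitA (income : PySem.Dict String (List String)) (root : String) :
    List String → List String → List String → Option (List (List String))
  | [], _clusters, edges => if is_tree edges root then some [edges] else none
  | b :: rest, clusters, edges =>
    some ((income.getD b []).foldl
      (fun res a =>
        if clusters_check clusters a b then
          match visitA income root rest (clusters_join clusters a b) (edges ++ [strAdd a b]) with
          | some r => res ++ r
          | none => res   -- Python: `result += None` raises TypeError; unreached under Pre_
        else res) [])

def seek_subtree (graph_edges_list : List (String × String)) : List (List String) :=
  let parsed := parse_graph graph_edges_list
  let nodes := parsed.1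
  let income := parsed.2.1
  let possible_roots := nodes.filter (fun i => !(income.contains i))
  if possible_roots.length > 1 then []
  else
    let possible_roots := if possible_roots.length = 0 then nodes else possible_roots
    possible_roots.foldl
      (fun res root =>
        let non_root := PySem.List.sorted (nodes.filter (fun i => decide (i ≠ root)))
            (fun i => ((income.getD i []).length : Int)) false
        match visitA income root non_root nodes [] with
        | some r => r
        | none => res)  -- Python: result = None, returned at top level (not a list); unreached under Pre_
      []

-- ===== PORT B =====
-- {n: (cb if c == ca else c) for n, c in comp.items()}
def relabel (comp : PySem.Dict String String) (ca cb : String) : PySem.Dict String String :=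
  comp.items.foldl (fun d p => d.insert p.1 (if p.2 = ca then cb else p.2)) PySem.Dict.empty

def seek_subtree_alt (graph_edges_list : List (String × String)) : List (List String) :=
  let parsed := parse_graph graph_edges_list
  let nodes := parsed.1
  let income := parsed.2.1
  let sources := nodes.filter (fun i => !(income.contains i))
  if sources.length > 1 then []
  else if nodes = [] then []
  else
    -- sources[0] / nodes[-1]: both lists are nonempty here, the defaults are dead
    let root := if sources.length = 0 then nodes.getLastD "" else sources.headD ""
    let order := PySem.List.sorted (nodes.filter (fun i => decide (i ≠ root)))
        (fun i => ((income.getD i []).length : Int)) false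
    let states0 : List (PySem.Dict String String × List String) :=
      [(nodes.foldl (fun d n => d.insert n n) PySem.Dict.empty, [])]   -- {n: n for n in nodes}
    let states := order.foldl
      (fun states b =>
        states.foldl
          (fun ns s =>
            (income.getD b []).foldl
              (fun ns a =>
                let ca := s.1.getD a ""   -- comp[a]; KeyError guard (every node is a key)
                let cb := s.1.getD b ""
                if ca ≠ cb then ns ++ [(relabel s.1 ca cb, s.2 ++ [strAdd a b])] else ns)
              ns)
          [])
      states0
    states.foldl (fun res s => if is_tree s.2 root then res ++ [s.2] else res) []

-- ===== PRECONDITION & SPEC =====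
-- Pre_ excludes inputs whose node labels are not all single characters (A builds each
-- chosen edge as the string a+b, later re-parsed by two-character unpacking, and tests
-- cluster membership by SUBSTRING, so other label lengths make A raise ValueError/TypeError
-- or take accidental substring branches) and graphs with exactly one distinct node (there A
-- returns None, not a list); graphs with more than one source node are admitted regardless
-- of labels, since both programs take the early no-solutions exit before any label is touched.
def Pre_seek_subtree (graph_edges_list : List (String × String)) : Prop :=
  let nodes := PySem.List.dedup (graph_edges_list.flatMap (fun p => [p.1, p.2]))
  1 < (nodes.filter (fun n => !(decide (n ∈ graph_edges_list.map Prod.snd)))).length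
  ∨ ((∀ p ∈ graph_edges_list, p.1.toList.length = 1 ∧ p.2.toList.length = 1) ∧ nodes.length ≠ 1)
instance (graph_edges_list : List (String × String)) : Decidable (Pre_seek_subtree graph_edges_list) := by
  unfold Pre_seek_subtree; infer_instance

def pvWitness_seek_subtree : (List (String × String)) := [("a", "b"), ("a", "c"), ("b", "c")]

def Spec_seek_subtree (graph_edges_list : List (String × String)) (out : List (List String)) : Prop := out = seek_subtree_alt graph_edges_list
instance (graph_edges_list : List (String × String)) (out : List (List String)) : Decidable (Spec_seek_subtree graph_edges_list out) := by unfold Spec_seek_subtree; infer_instance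

-- ===== CLAIM (what is proved, stated in full; the proofs are below) =====
def Claim_equal_seek_subtree : Prop := ∀ (graph_edges_list : List (String × String)), Dom_seek_subtree graph_edges_list → Pre_seek_subtree graph_edges_list → Spec_seek_subtree graph_edges_list (seek_subtree graph_edges_list)

-- ===== LEMMAS AND PROOFS =====
def pvFlat (clusters : List String) : List Char := clusters.flatMap String.toList

def SameClu (clusters : List String) (x y : String) : Prop :=
  ∃ i, i ∈ clusters ∧ PySem.Str.isIn x i = true ∧ PySem.Str.isIn y i = true

theorem isIn_single {a : String} {c : Char} (i : String) (h : a.toList = [c]) :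
    PySem.Str.isIn a i = true ↔ c ∈ i.toList := by
  rw [PySem.Str.isIn_iff_infix, h, List.singleton_infix_iff]

theorem pvFlat_cons (i : String) (rest : List String) :
    pvFlat (i :: rest) = i.toList ++ pvFlat rest := by
  simp [pvFlat]

theorem mem_pvFlat {cl : List String} {c : Char} :
    c ∈ pvFlat cl ↔ ∃ i, i ∈ cl ∧ c ∈ i.toList := by
  simp [pvFlat, List.mem_flatMap]

theorem unique_cluster {cl : List String} (hnd : (pvFlat cl).Nodup) {A B : String} {c : Char}
    (hA : A ∈ cl) (hB : B ∈ cl) (hcA : c ∈ A.toList) (hcB : c ∈ B.toList) : A = B := by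
  induction cl with
  | nil => cases hA
  | cons i rest ih =>
    rw [pvFlat_cons] at hnd
    have hdisj := (List.nodup_append.mp hnd).2.2
    have hndr : (pvFlat rest).Nodup := (List.nodup_append.mp hnd).2.1
    rcases List.mem_cons.mp hA with rfl | hA'
    · rcases List.mem_cons.mp hB with rfl | hB'
      · rfl
      · exact absurd (mem_pvFlat.mpr ⟨B, hB', hcB⟩) (fun h => hdisj _ hcA _ h rfl)
    · rcases List.mem_cons.mp hB with rfl | hB'
      · exact absurd (mem_pvFlat.mpr ⟨A, hA', hcA⟩) (fun h => hdisj _ hcB _ h rfl)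
      · exact ih hndr hA' hB'

theorem filter_isIn_eq {cl : List String} (hnd : (pvFlat cl).Nodup) {a A : String} {c : Char}
    (ha : a.toList = [c]) (hA : A ∈ cl) (hcA : c ∈ A.toList) :
    cl.filter (fun i => PySem.Str.isIn a i) = [A] := by
  induction cl with
  | nil => cases hA
  | cons i rest ih =>
    rw [pvFlat_cons] at hnd
    have hdisj := (List.nodup_append.mp hnd).2.2
    have hndr : (pvFlat rest).Nodup := (List.nodup_append.mp hnd).2.1
    by_cases hin : c ∈ i.toList
    · have hAi : A = i :=
        unique_cluster (by rw [pvFlat_cons]; exact hnd) hA List.mem_cons_self hcA hin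
      subst hAi
      have h1 : PySem.Str.isIn a A = true := (isIn_single A ha).mpr hin
      have h2 : rest.filter (fun i => PySem.Str.isIn a i) = [] := by
        apply List.filter_eq_nil_iff.mpr
        intro j hj hji
        exact hdisj _ hcA _ (mem_pvFlat.mpr ⟨j, hj, (isIn_single j ha).mp hji⟩) rfl
      rw [List.filter_cons, if_pos h1, h2]
    · have hA' : A ∈ rest := by
        rcases List.mem_cons.mp hA with rfl | hA'
        · exact absurd hcA hin
        · exact hA'
      have h1 : ¬ (PySem.Str.isIn a i = true) := fun h => hin ((isIn_single i ha).mp h)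
      rw [List.filter_cons, if_neg h1, ih hndr hA']

theorem check_eq_cons (i : String) (rest : List String) (a b : String) :
    clusters_check (i :: rest) a b =
      if PySem.Str.isIn a i then !(PySem.Str.isIn b i) else clusters_check rest a b := rfl

theorem check_iff {cl : List String} (hnd : (pvFlat cl).Nodup) {a : String} {c : Char}
    (ha : a.toList = [c]) (hc : c ∈ pvFlat cl) (b : String) :
    (clusters_check cl a b = true ↔ ¬ SameClu cl a b) := by
  induction cl with
  | nil => simp [pvFlat] at hc
  | cons i rest ih =>
    rw [pvFlat_cons] at hnd
    have hdisj := (List.nodup_append.mp hnd).2.2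
    have hndr : (pvFlat rest).Nodup := (List.nodup_append.mp hnd).2.1
    by_cases hin : PySem.Str.isIn a i = true
    · have hci : c ∈ i.toList := (isIn_single i ha).mp hin
      rw [check_eq_cons, if_pos hin]
      constructor
      · rintro h ⟨j, hj, hja, hjb⟩
        have hcj : c ∈ j.toList := (isIn_single j ha).mp hja
        have hji : j = i := by
          rcases List.mem_cons.mp hj with rfl | hj'
          · rfl
          · exact absurd (mem_pvFlat.mpr ⟨j, hj', hcj⟩) (fun hh => hdisj _ hci _ hh rfl)
        subst hji
        rw [hjb] at h
        simp at h
      · intro h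
        by_contra hb
        rw [Bool.not_eq_true, Bool.not_eq_false'] at hb
        exact h ⟨i, List.mem_cons_self, hin, hb⟩
    · have hci : c ∉ i.toList := fun hh => hin ((isIn_single i ha).mpr hh)
      have hcr : c ∈ pvFlat rest := by
        rw [pvFlat_cons] at hc
        rcases List.mem_append.mp hc with h | h
        · exact absurd h hci
        · exact h
      rw [check_eq_cons, if_neg hin, ih hndr hcr]
      constructor
      · rintro h ⟨j, hj, hja, hjb⟩
        rcases List.mem_cons.mp hj with rfl | hj'
        · exact hin hja
        · exact h ⟨j, hj', hja, hjb⟩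
      · rintro h ⟨j, hj, hja, hjb⟩
        exact h ⟨j, List.mem_cons_of_mem _ hj, hja, hjb⟩

theorem relabel_items (comp : PySem.Dict String String) (u v : String)
    (h : comp.keys.Nodup) :
    (relabel comp u v).items = comp.items.map (fun p => (p.1, if p.2 = u then v else p.2)) := by
  have := PySem.Dict.items_foldl_insert_fresh (d := (PySem.Dict.empty : PySem.Dict String String))
    (l := comp.items) (k := Prod.fst) (v := fun p => if p.2 = u then v else p.2)
    (fun a _ => PySem.Dict.contains_empty a.1) h
  simpa [relabel] using this

theorem relabel_keys (comp : PySem.Dict String String) (u v : String)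
    (h : comp.keys.Nodup) : (relabel comp u v).keys = comp.keys := by
  simp only [PySem.Dict.keys, relabel_items comp u v h, List.map_map]
  rfl

theorem relabel_get? (comp : PySem.Dict String String) (u v : String)
    (h : comp.keys.Nodup) {x w : String} (hx : comp.get? x = some w) :
    (relabel comp u v).get? x = some (if w = u then v else w) := by
  apply PySem.Dict.get?_of_mem_items
  · rw [relabel_items comp u v h]
    exact List.mem_map.mpr ⟨(x, w), PySem.Dict.mem_items_of_get?_eq_some comp hx, rfl⟩
  · rw [relabel_keys comp u v h]; exact h

theorem comp0_get? (ns : List String) :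
    ∀ (d : PySem.Dict String String) (x : String),
      (ns.foldl (fun d n => d.insert n n) d).get? x = if x ∈ ns then some x else d.get? x := by
  induction ns with
  | nil => intro d x; simp
  | cons n ns ih =>
    intro d x
    rw [List.foldl_cons, ih]
    by_cases hx : x ∈ ns
    · rw [if_pos hx, if_pos (List.mem_cons_of_mem _ hx)]
    · rw [if_neg hx]
      by_cases hxn : x = n
      · subst hxn
        rw [if_pos List.mem_cons_self, PySem.Dict.get?_insert_self]
      · rw [if_neg (by simp [hxn, hx]), PySem.Dict.get?_insert_of_ne _ _ hxn]

theorem comp0_keys (ns : List String) (hnd : ns.Nodup) :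
    (ns.foldl (fun d n => d.insert n n) (PySem.Dict.empty : PySem.Dict String String)).keys = ns := by
  rw [PySem.Dict.keys_foldl_insert ns (fun _ n => n) PySem.Dict.empty, PySem.Dict.keys_empty,
    PySem.Set.update_nil_left, PySem.Set.ofList_eq_self_of_nodup _ hnd]

-- parse_graph decomposition
def stepN (ns : List String) (p : String × String) : List String :=
  let a := if p.1 ∈ ns then ns else ns ++ [p.1]
  if p.2 ∈ a then a else a ++ [p.2]

def stepI (d : PySem.Dict String (List String)) (p : String × String) :
    PySem.Dict String (List String) := d.insert p.2 (d.getD p.2 [] ++ [p.1])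

def stepO (d : PySem.Dict String (List String)) (p : String × String) :
    PySem.Dict String (List String) := d.insert p.1 (d.getD p.1 [] ++ [p.2])

theorem parse_split (l : List (String × String)) :
    ∀ ns inc out, l.foldl
      (fun st p =>
        let outcome := st.2.2.insert p.1 (st.2.2.getD p.1 [] ++ [p.2])
        let income := st.2.1.insert p.2 (st.2.1.getD p.2 [] ++ [p.1])
        let nodes := if p.1 ∈ st.1 then st.1 else st.1 ++ [p.1]
        let nodes := if p.2 ∈ nodes then nodes else nodes ++ [p.2]
        (nodes, income, outcome))
      (ns, inc, out) = (l.foldl stepN ns, l.foldl stepI inc, l.foldl stepO out) := by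
  induction l with
  | nil => intro ns inc out; rfl
  | cons p rest ih =>
    intro ns inc out
    rw [List.foldl_cons, List.foldl_cons, List.foldl_cons, List.foldl_cons]
    exact ih _ _ _

theorem parse_eq (l : List (String × String)) :
    parse_graph l = (l.foldl stepN [], l.foldl stepI PySem.Dict.empty, l.foldl stepO PySem.Dict.empty) := by
  rw [parse_graph, parse_split]

theorem set_add_eq (ns : List String) (x : String) :
    PySem.Set.add ns x = if x ∈ ns then ns else ns ++ [x] := by
  rw [PySem.Set.add]
  by_cases h : x ∈ ns
  · rw [if_pos h, if_pos]
    exact (PySem.Set.contains_iff _ _).mpr h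
  · rw [if_neg h, if_neg]
    intro hc
    exact h ((PySem.Set.contains_iff _ _).mp hc)

theorem nodes_eq (l : List (String × String)) :
    ∀ ns, l.foldl stepN ns = PySem.Set.update ns (l.flatMap fun p => [p.1, p.2]) := by
  induction l with
  | nil => intro ns; simp [PySem.Set.update]
  | cons p rest ih =>
    intro ns
    rw [List.foldl_cons, ih]
    have : stepN ns p = PySem.Set.add (PySem.Set.add ns p.1) p.2 := by
      rw [stepN, set_add_eq, set_add_eq]
    rw [this]
    simp [PySem.Set.update]

theorem parse_nodes (l : List (String × String)) :
    (parse_graph l).1 = PySem.List.dedup (l.flatMap fun p => [p.1, p.2]) := by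
  rw [parse_eq]
  show l.foldl stepN [] = _
  rw [nodes_eq, PySem.Set.update_nil_left, PySem.List.dedup_eq_ofList]

theorem income_mem (l : List (String × String)) :
    ∀ (d : PySem.Dict String (List String)) (b x : String),
      x ∈ (l.foldl stepI d).getD b [] → x ∈ d.getD b [] ∨ (x, b) ∈ l := by
  induction l with
  | nil => intro d b x h; exact Or.inl h
  | cons p rest ih =>
    intro d b x h
    rw [List.foldl_cons] at h
    rcases ih _ b x h with h' | h'
    · rw [stepI, PySem.Dict.getD_insert] at h'
      by_cases hb : b = p.2
      · rw [if_pos hb] at h'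
        rcases List.mem_append.mp h' with h'' | h''
        · exact Or.inl (by rw [hb]; exact h'')
        · refine Or.inr (List.mem_cons.mpr (Or.inl ?_))
          have : x = p.1 := List.mem_singleton.mp h''
          rw [this, hb]
      · rw [if_neg hb] at h'
        exact Or.inl h'
    · exact Or.inr (List.mem_cons_of_mem _ h')

theorem income_contains (l : List (String × String)) (b : String) :
    (l.foldl stepI (PySem.Dict.empty : PySem.Dict String (List String))).contains b
      = decide (b ∈ l.map Prod.snd) := by
  have hk : (l.foldl stepI (PySem.Dict.empty : PySem.Dict String (List String))).keys
      = PySem.Set.ofList (l.map Prod.snd) := by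
    have := PySem.Dict.keys_foldl_insert_key (l := l) (key := Prod.snd)
      (f := fun d p => d.getD p.2 [] ++ [p.1]) (d := (PySem.Dict.empty : PySem.Dict String (List String)))
    have halign : List.foldl stepI (PySem.Dict.empty : PySem.Dict String (List String)) l
        = List.foldl (fun d x => d.insert x.2 (d.getD x.2 [] ++ [x.1])) PySem.Dict.empty l := rfl
    rw [halign, this, PySem.Dict.keys_empty, PySem.Set.update_nil_left]
  by_cases hb : b ∈ l.map Prod.snd
  · rw [decide_eq_true hb]
    exact (PySem.Dict.contains_iff_mem_keys _ _).mpr (by rw [hk]; exact (PySem.Set.mem_ofList _ _).mpr hb)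
  · rw [decide_eq_false hb]
    rw [Bool.eq_false_iff]
    intro hc
    exact hb ((PySem.Set.mem_ofList _ _).mp (by rw [← hk]; exact (PySem.Dict.contains_iff_mem_keys _ _).mp hc))

def pvInv (NS cl : List String) (comp : PySem.Dict String String) : Prop :=
  (pvFlat cl).Nodup ∧
  (∀ c ∈ pvFlat cl, ∃ n, n ∈ NS ∧ n.toList = [c]) ∧
  (∀ n ∈ NS, ∀ c, n.toList = [c] → c ∈ pvFlat cl) ∧
  comp.keys = NS ∧
  (∀ x, x ∈ NS → ∀ y, y ∈ NS → (SameClu cl x y ↔ comp.getD x "" = comp.getD y ""))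

theorem same_mem_iff {cl : List String} (hnd : (pvFlat cl).Nodup) {x a A : String}
    {cx ca : Char} (hx : x.toList = [cx]) (ha : a.toList = [ca])
    (hA : A ∈ cl) (hcA : ca ∈ A.toList) :
    SameClu cl x a ↔ cx ∈ A.toList := by
  constructor
  · rintro ⟨j, hj, hjx, hja⟩
    have : j = A := unique_cluster hnd hj hA ((isIn_single j ha).mp hja) hcA
    subst this
    exact (isIn_single j hx).mp hjx
  · intro h
    exact ⟨A, hA, (isIn_single A hx).mpr h, (isIn_single A ha).mpr hcA⟩

theorem getD_some {comp : PySem.Dict String String} {x : String} (h : comp.contains x = true) :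
    comp.get? x = some (comp.getD x "") := by
  rw [PySem.Dict.contains_eq_isSome_get?] at h
  obtain ⟨w, hw⟩ := Option.isSome_iff_exists.mp h
  rw [hw, PySem.Dict.getD_eq_get?_getD, hw]
  rfl

theorem pv_preserve (NS cl : List String) (comp : PySem.Dict String String)
    (hone : ∀ n ∈ NS, ∃ c, n.toList = [c]) (hnsnd : NS.Nodup)
    (hInv : pvInv NS cl comp) {a b : String} (ha : a ∈ NS) (hb : b ∈ NS)
    (hdiff : ¬ SameClu cl a b) :
    pvInv NS (clusters_join cl a b) (relabel comp (comp.getD a "") (comp.getD b "")) := by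
  obtain ⟨hnd, hchars, hcov, hkeys, hR2⟩ := hInv
  obtain ⟨ca, hca⟩ := hone a ha
  obtain ⟨cb, hcb⟩ := hone b hb
  obtain ⟨A, hA, hcaA⟩ := mem_pvFlat.mp (hcov a ha ca hca)
  obtain ⟨B, hB, hcbB⟩ := mem_pvFlat.mp (hcov b hb cb hcb)
  have hknd : comp.keys.Nodup := by rw [hkeys]; exact hnsnd
  have hAB : A ≠ B := by
    rintro rfl
    exact hdiff ⟨A, hA, (isIn_single A hca).mpr hcaA, (isIn_single A hcb).mpr hcbB⟩
  have hfa : cl.filter (fun i => PySem.Str.isIn a i) = [A] := filter_isIn_eq hnd hca hA hcaA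
  have hfb : cl.filter (fun i => PySem.Str.isIn b i) = [B] := filter_isIn_eq hnd hcb hB hcbB
  have hjoin : clusters_join cl a b
      = cl.filter (fun i => !(PySem.Str.isIn a i) && !(PySem.Str.isIn b i)) ++ [strAdd A B] := by
    rw [clusters_join, hfa, hfb]
    simp [hAB]
  set S := cl.filter (fun i => !(PySem.Str.isIn a i) && !(PySem.Str.isIn b i)) with hS
  have hmemS : ∀ j, j ∈ S ↔ j ∈ cl ∧ ca ∉ j.toList ∧ cb ∉ j.toList := by
    intro j
    rw [hS, List.mem_filter]
    constructor
    · rintro ⟨h1, h2⟩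
      rw [Bool.and_eq_true, Bool.not_eq_true', Bool.not_eq_true'] at h2
      exact ⟨h1, fun hc => by rw [(isIn_single j hca).mpr hc] at h2; exact absurd h2.1 (by simp),
        fun hc => by rw [(isIn_single j hcb).mpr hc] at h2; exact absurd h2.2 (by simp)⟩
    · rintro ⟨h1, h2, h3⟩
      refine ⟨h1, ?_⟩
      rw [Bool.and_eq_true, Bool.not_eq_true', Bool.not_eq_true']
      constructor
      · rw [Bool.eq_false_iff]; intro hc; exact h2 ((isIn_single j hca).mp hc)
      · rw [Bool.eq_false_iff]; intro hc; exact h3 ((isIn_single j hcb).mp hc)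
  have hstr : (strAdd A B).toList = A.toList ++ B.toList := by
    simp [strAdd]
  have hflat' : pvFlat (clusters_join cl a b) = pvFlat S ++ (A.toList ++ B.toList) := by
    rw [hjoin]; simp [pvFlat, hstr]
  have hsubS : ∀ c ∈ pvFlat S, c ∈ pvFlat cl := by
    intro c hc
    obtain ⟨j, hj, hcj⟩ := mem_pvFlat.mp hc
    exact mem_pvFlat.mpr ⟨j, ((hmemS j).mp hj).1, hcj⟩
  have hflatten : ∀ {j : String}, j ∈ cl → j.toList.Sublist (pvFlat cl) := by
    intro j hj
    have h1 : j.toList ∈ cl.map String.toList := List.mem_map_of_mem hj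
    have h2 := List.sublist_flatten_of_mem h1
    rwa [show (cl.map String.toList).flatten = pvFlat cl from String.ofList_inj.mp rfl] at h2
  have hAsub : A.toList.Sublist (pvFlat cl) := hflatten hA
  have hBsub : B.toList.Sublist (pvFlat cl) := hflatten hB
  have hdisjAB : ∀ c, c ∈ A.toList → c ∈ B.toList → False := by
    intro c h1 h2
    exact hAB (unique_cluster hnd hA hB h1 h2)
  have hnd' : (pvFlat (clusters_join cl a b)).Nodup := by
    rw [hflat']
    rw [List.nodup_append]
    refine ⟨?_, ?_, ?_⟩
    · exact (List.Sublist.flatMap List.filter_sublist String.toList).nodup hnd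
    · rw [List.nodup_append]
      exact ⟨hAsub.nodup hnd, hBsub.nodup hnd, fun c h1 c' h2 he => hdisjAB c h1 (he ▸ h2)⟩
    · intro c hcS c' hc' he
      subst he
      obtain ⟨j, hj, hcj⟩ := mem_pvFlat.mp hcS
      obtain ⟨hjcl, hcaj, hcbj⟩ := (hmemS j).mp hj
      rcases List.mem_append.mp hc' with hcA' | hcB'
      · exact hcaj (unique_cluster hnd hjcl hA hcj hcA' ▸ hcaA)
      · exact hcbj (unique_cluster hnd hjcl hB hcj hcB' ▸ hcbB)
  refine ⟨hnd', ?_, ?_, ?_, ?_⟩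
  · intro c hc
    rw [hflat'] at hc
    rcases List.mem_append.mp hc with h | h
    · exact hchars c (hsubS c h)
    · rcases List.mem_append.mp h with h | h
      · exact hchars c (mem_pvFlat.mpr ⟨A, hA, h⟩)
      · exact hchars c (mem_pvFlat.mpr ⟨B, hB, h⟩)
  · intro n hn c hc
    rw [hflat']
    obtain ⟨j, hj, hcj⟩ := mem_pvFlat.mp (hcov n hn c hc)
    by_cases hcA' : c ∈ A.toList
    · exact List.mem_append.mpr (Or.inr (List.mem_append.mpr (Or.inl hcA')))
    · by_cases hcB' : c ∈ B.toList
      · exact List.mem_append.mpr (Or.inr (List.mem_append.mpr (Or.inr hcB')))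
      · have hjS : j ∈ S := by
          rw [hmemS]
          refine ⟨hj, fun hcaj => ?_, fun hcbj => ?_⟩
          · exact hcA' (unique_cluster hnd hj hA hcaj hcaA ▸ hcj)
          · exact hcB' (unique_cluster hnd hj hB hcbj hcbB ▸ hcj)
        exact List.mem_append.mpr (Or.inl (mem_pvFlat.mpr ⟨j, hjS, hcj⟩))
  · rw [relabel_keys _ _ _ hknd]; exact hkeys
  · intro x hx y hy
    obtain ⟨cx, hcx⟩ := hone x hx
    obtain ⟨cy, hcy⟩ := hone y hy
    have hcontains : ∀ z, z ∈ NS → comp.contains z = true := by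
      intro z hz
      exact (PySem.Dict.contains_iff_mem_keys _ _).mpr (by rw [hkeys]; exact hz)
    set va := comp.getD a "" with hva
    set vb := comp.getD b "" with hvb
    set vx := comp.getD x "" with hvx
    set vy := comp.getD y "" with hvy
    have hgx : (relabel comp va vb).getD x "" = if vx = va then vb else vx := by
      rw [PySem.Dict.getD_eq_get?_getD, relabel_get? _ _ _ hknd (getD_some (hcontains x hx))]
      rfl
    have hgy : (relabel comp va vb).getD y "" = if vy = va then vb else vy := by
      rw [PySem.Dict.getD_eq_get?_getD, relabel_get? _ _ _ hknd (getD_some (hcontains y hy))]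
      rfl
    have hvab : va ≠ vb := fun h => hdiff ((hR2 a ha b hb).mpr h)
    have hxA : vx = va ↔ cx ∈ A.toList :=
      Iff.trans (Iff.symm (hR2 x hx a ha)) (same_mem_iff hnd hcx hca hA hcaA)
    have hxB : vx = vb ↔ cx ∈ B.toList :=
      Iff.trans (Iff.symm (hR2 x hx b hb)) (same_mem_iff hnd hcx hcb hB hcbB)
    have hyA : vy = va ↔ cy ∈ A.toList :=
      Iff.trans (Iff.symm (hR2 y hy a ha)) (same_mem_iff hnd hcy hca hA hcaA)
    have hyB : vy = vb ↔ cy ∈ B.toList :=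
      Iff.trans (Iff.symm (hR2 y hy b hb)) (same_mem_iff hnd hcy hcb hB hcbB)
    have hxy : SameClu cl x y ↔ vx = vy := hR2 x hx y hy
    have hLHS : SameClu (clusters_join cl a b) x y ↔
        ((vx = vy ∧ ¬ vx = va ∧ ¬ vx = vb) ∨ ((vx = va ∨ vx = vb) ∧ (vy = va ∨ vy = vb))) := by
      constructor
      · rintro ⟨j, hj, hjx, hjy⟩
        rw [hjoin] at hj
        rcases List.mem_append.mp hj with hjS | hjT
        · obtain ⟨hjcl, hcaj, hcbj⟩ := (hmemS j).mp hjS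
          have hcxj : cx ∈ j.toList := (isIn_single j hcx).mp hjx
          have hsame : SameClu cl x y := ⟨j, hjcl, hjx, hjy⟩
          refine Or.inl ⟨hxy.mp hsame, fun hv => ?_, fun hv => ?_⟩
          · exact hcaj (unique_cluster hnd hjcl hA hcxj (hxA.mp hv) ▸ hcaA)
          · exact hcbj (unique_cluster hnd hjcl hB hcxj (hxB.mp hv) ▸ hcbB)
        · have hjT' : j = strAdd A B := List.mem_singleton.mp hjT
          subst hjT'
          have h1 : cx ∈ A.toList ++ B.toList := by
            rw [← hstr]; exact (isIn_single _ hcx).mp hjx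
          have h2 : cy ∈ A.toList ++ B.toList := by
            rw [← hstr]; exact (isIn_single _ hcy).mp hjy
          refine Or.inr ⟨?_, ?_⟩
          · rcases List.mem_append.mp h1 with h | h
            · exact Or.inl (hxA.mpr h)
            · exact Or.inr (hxB.mpr h)
          · rcases List.mem_append.mp h2 with h | h
            · exact Or.inl (hyA.mpr h)
            · exact Or.inr (hyB.mpr h)
      · rintro (⟨hxyv, hnva, hnvb⟩ | ⟨hx1, hy1⟩)
        · obtain ⟨j, hjcl, hjx, hjy⟩ := hxy.mpr hxyv
          have hcxj : cx ∈ j.toList := (isIn_single j hcx).mp hjx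
          have hjS : j ∈ S := by
            rw [hmemS]
            refine ⟨hjcl, fun hcaj => ?_, fun hcbj => ?_⟩
            · exact hnva (hxA.mpr (unique_cluster hnd hjcl hA hcaj hcaA ▸ hcxj))
            · exact hnvb (hxB.mpr (unique_cluster hnd hjcl hB hcbj hcbB ▸ hcxj))
          exact ⟨j, by rw [hjoin]; exact List.mem_append.mpr (Or.inl hjS), hjx, hjy⟩
        · refine ⟨strAdd A B, by rw [hjoin]; exact List.mem_append.mpr (Or.inr (List.mem_singleton_self _)), ?_, ?_⟩
          · rw [isIn_single _ hcx, hstr]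
            rcases hx1 with h | h
            · exact List.mem_append.mpr (Or.inl (hxA.mp h))
            · exact List.mem_append.mpr (Or.inr (hxB.mp h))
          · rw [isIn_single _ hcy, hstr]
            rcases hy1 with h | h
            · exact List.mem_append.mpr (Or.inl (hyA.mp h))
            · exact List.mem_append.mpr (Or.inr (hyB.mp h))
    rw [hLHS, hgx, hgy]
    by_cases h1 : vx = va <;> by_cases h2 : vx = vb <;> by_cases h3 : vy = va <;> by_cases h4 : vy = vb <;>
      simp [h1, h2, h3, h4, hvab]
    all_goals exact fun h => h4 h.symm

theorem flat_nodup (NS : List String) (hone : ∀ n ∈ NS, ∃ c, n.toList = [c])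
    (hnsnd : NS.Nodup) : (pvFlat NS).Nodup := by
  induction NS with
  | nil => simp [pvFlat]
  | cons n rest ih =>
    obtain ⟨c, hc⟩ := hone n List.mem_cons_self
    rw [pvFlat_cons, List.nodup_append]
    refine ⟨by rw [hc]; simp, ih (fun m hm => hone m (List.mem_cons_of_mem _ hm)) hnsnd.of_cons, ?_⟩
    intro u hu v hv he
    subst he
    obtain ⟨m, hm, hcm⟩ := mem_pvFlat.mp hv
    obtain ⟨cm, hcm'⟩ := hone m (List.mem_cons_of_mem _ hm)
    rw [hc] at hu
    rw [hcm'] at hcm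
    have : u = cm := List.mem_singleton.mp hcm
    have hnm : n = m := by
      apply String.toList_inj.mp
      rw [hc, hcm', ← this, List.mem_singleton.mp hu]
    exact (List.nodup_cons.mp hnsnd).1 (hnm ▸ hm)

theorem init_inv (NS : List String) (hone : ∀ n ∈ NS, ∃ c, n.toList = [c])
    (hnsnd : NS.Nodup) :
    pvInv NS NS (NS.foldl (fun d n => d.insert n n) PySem.Dict.empty) := by
  have hget : ∀ x ∈ NS,
      (NS.foldl (fun d n => d.insert n n) (PySem.Dict.empty : PySem.Dict String String)).getD x "" = x := by
    intro x hx
    rw [PySem.Dict.getD_eq_get?_getD, comp0_get?, if_pos hx]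
    rfl
  refine ⟨flat_nodup NS hone hnsnd, ?_, ?_, comp0_keys NS hnsnd, ?_⟩
  · intro c hc
    obtain ⟨n, hn, hcn⟩ := mem_pvFlat.mp hc
    obtain ⟨c', hc'⟩ := hone n hn
    rw [hc'] at hcn
    exact ⟨n, hn, by rw [hc', List.mem_singleton.mp hcn]⟩
  · intro n hn c hc
    exact mem_pvFlat.mpr ⟨n, hn, by rw [hc]; exact List.mem_singleton_self _⟩
  · intro x hx y hy
    rw [hget x hx, hget y hy]
    obtain ⟨cx, hcx⟩ := hone x hx
    obtain ⟨cy, hcy⟩ := hone y hy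
    constructor
    · rintro ⟨j, hj, hjx, hjy⟩
      obtain ⟨cj, hcj⟩ := hone j hj
      have h1 : cx ∈ j.toList := (isIn_single j hcx).mp hjx
      have h2 : cy ∈ j.toList := (isIn_single j hcy).mp hjy
      rw [hcj] at h1 h2
      apply String.toList_inj.mp
      rw [hcx, hcy, List.mem_singleton.mp h1, List.mem_singleton.mp h2]
    · rintro rfl
      exact ⟨x, hx, (isIn_single x hcx).mpr (by rw [hcx]; exact List.mem_singleton_self _),
        (isIn_single x hcx).mpr (by rw [hcx]; exact List.mem_singleton_self _)⟩

-- ---- DFS leaves enumeration shared by both characterizations ----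
def leavesF (income : PySem.Dict String (List String)) :
    List String → PySem.Dict String String → List String → List (List String)
  | [], _c, e => [e]
  | b :: rest, c, e =>
    (income.getD b []).flatMap (fun a =>
      if c.getD a "" ≠ c.getD b "" then
        leavesF income rest (relabel c (c.getD a "") (c.getD b "")) (e ++ [strAdd a b])
      else [])

theorem filter_flatMap' {α β : Type} (l : List α) (g : α → List β) (p : β → Bool) :
    (l.flatMap g).filter p = l.flatMap (fun a => (g a).filter p) := by
  induction l with
  | nil => rfl
  | cons x xs ih => simp [List.flatMap_cons, List.filter_append, ih]

-- A's recursive search collects, over Pre_'s invariants, exactly the is_tree-passing leaves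
theorem visitA_char (income : PySem.Dict String (List String)) (root : String) (NS : List String)
    (hone : ∀ n ∈ NS, ∃ c, n.toList = [c]) (hnsnd : NS.Nodup)
    (hinc : ∀ b x : String, x ∈ income.getD b [] → x ∈ NS) :
    ∀ (left : List String) (cl : List String) (comp : PySem.Dict String String)
      (edges : List String), (∀ n ∈ left, n ∈ NS) → pvInv NS cl comp → left ≠ [] →
      visitA income root left cl edges
        = some ((leavesF income left comp edges).filter (fun e => is_tree e root)) := by
  intro left
  induction left with
  | nil => intro _ _ _ _ _ h; exact absurd rfl h
  | cons b rest ih =>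
    intro cl comp edges hleft hInv _
    rw [visitA]
    obtain ⟨hnd, hchars, hcov, hkeys, hR2⟩ := hInv
    have hbNS : b ∈ NS := hleft b List.mem_cons_self
    have hpoint : ∀ a ∈ income.getD b [], ∀ res : List (List String),
        (if clusters_check cl a b then
          match visitA income root rest (clusters_join cl a b) (edges ++ [strAdd a b]) with
          | some r => res ++ r
          | none => res
        else res)
        = res ++ ((if comp.getD a "" ≠ comp.getD b "" then
              leavesF income rest (relabel comp (comp.getD a "") (comp.getD b ""))
                (edges ++ [strAdd a b])
            else []).filter (fun e => is_tree e root)) := by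
      intro a ha res
      have haNS : a ∈ NS := hinc b a ha
      obtain ⟨ca, hca⟩ := hone a haNS
      have hcheck : clusters_check cl a b = true ↔ ¬ SameClu cl a b :=
        check_iff hnd hca (hcov a haNS ca hca) b
      have hR2ab : SameClu cl a b ↔ comp.getD a "" = comp.getD b "" := hR2 a haNS b hbNS
      by_cases hs : SameClu cl a b
      · have h1 : clusters_check cl a b = false := by
          rw [Bool.eq_false_iff]; intro h; exact (hcheck.mp h) hs
        have h2 : comp.getD a "" = comp.getD b "" := hR2ab.mp hs
        simp [h1, h2]
      · have h1 : clusters_check cl a b = true := hcheck.mpr hs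
        have h2 : comp.getD a "" ≠ comp.getD b "" := fun he => hs (hR2ab.mpr he)
        have hInv' : pvInv NS (clusters_join cl a b)
            (relabel comp (comp.getD a "") (comp.getD b "")) :=
          pv_preserve NS cl comp hone hnsnd ⟨hnd, hchars, hcov, hkeys, hR2⟩ haNS hbNS hs
        rw [h1, if_pos h2]
        cases hrest : rest with
        | nil =>
          rw [show visitA income root [] (clusters_join cl a b) (edges ++ [strAdd a b])
              = if is_tree (edges ++ [strAdd a b]) root then some [edges ++ [strAdd a b]] else none
            from rfl]
          rw [show leavesF income [] (relabel comp (comp.getD a "") (comp.getD b ""))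
              (edges ++ [strAdd a b]) = [edges ++ [strAdd a b]] from rfl]
          by_cases hp : is_tree (edges ++ [strAdd a b]) root = true
          · simp [hp]
          · rw [Bool.not_eq_true] at hp
            simp [hp]
        | cons r0 rs =>
          rw [← hrest,
            ih (clusters_join cl a b) (relabel comp (comp.getD a "") (comp.getD b ""))
              (edges ++ [strAdd a b]) (fun n hn => hleft n (List.mem_cons_of_mem _ hn)) hInv'
              (by rw [hrest]; exact (List.cons_ne_nil _ _))]
          simp
    have hfold : (income.getD b []).foldl
        (fun res a =>
          if clusters_check cl a b then
            match visitA income root rest (clusters_join cl a b) (edges ++ [strAdd a b]) with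
            | some r => res ++ r
            | none => res
          else res) []
        = (income.getD b []).foldl
          (fun res a => res ++ ((if comp.getD a "" ≠ comp.getD b "" then
              leavesF income rest (relabel comp (comp.getD a "") (comp.getD b ""))
                (edges ++ [strAdd a b])
            else []).filter (fun e => is_tree e root))) [] := by
      apply PySem.List.foldl_congr_mem
      intro res a ha
      exact hpoint a ha res
    rw [hfold, PySem.List.foldl_append_eq_flatMap]
    rw [show leavesF income (b :: rest) comp edges
        = (income.getD b []).flatMap (fun a =>
            if comp.getD a "" ≠ comp.getD b "" then
              leavesF income rest (relabel comp (comp.getD a "") (comp.getD b ""))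
                (edges ++ [strAdd a b])
            else []) from rfl]
    rw [filter_flatMap']
    simp

-- ---- B side: the breadth-first frontier equals the DFS leaf enumeration ----
def stepB (income : PySem.Dict String (List String)) (b : String)
    (s : PySem.Dict String String × List String) :
    List (PySem.Dict String String × List String) :=
  (income.getD b []).flatMap (fun a =>
    if s.1.getD a "" ≠ s.1.getD b "" then
      [(relabel s.1 (s.1.getD a "") (s.1.getD b ""), s.2 ++ [strAdd a b])]
    else [])

theorem innerB_eq (income : PySem.Dict String (List String)) (b : String)
    (s : PySem.Dict String String × List String)
    (ns : List (PySem.Dict String String × List String)) :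
    (income.getD b []).foldl
      (fun ns a =>
        let ca := s.1.getD a ""
        let cb := s.1.getD b ""
        if ca ≠ cb then ns ++ [(relabel s.1 ca cb, s.2 ++ [strAdd a b])] else ns)
      ns = ns ++ stepB income b s := by
  rw [stepB, ← PySem.List.foldl_append_eq_flatMap]
  apply PySem.List.foldl_congr_mem
  intro acc a _
  by_cases h : s.1.getD a "" ≠ s.1.getD b ""
  · rw [if_pos h, if_pos h]
  · rw [if_neg h, if_neg h, List.append_nil]

def finalStatesF (income : PySem.Dict String (List String)) :
    List String → PySem.Dict String String → List String →
    List (PySem.Dict String String × List String)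
  | [], c, e => [(c, e)]
  | b :: rest, c, e => (stepB income b (c, e)).flatMap (fun s => finalStatesF income rest s.1 s.2)

theorem foldLevels (income : PySem.Dict String (List String)) :
    ∀ (left : List String) (S : List (PySem.Dict String String × List String)),
      left.foldl
        (fun states b =>
          states.foldl
            (fun ns s =>
              (income.getD b []).foldl
                (fun ns a =>
                  let ca := s.1.getD a ""
                  let cb := s.1.getD b ""
                  if ca ≠ cb then ns ++ [(relabel s.1 ca cb, s.2 ++ [strAdd a b])] else ns)
                ns)
            [])
        S = S.flatMap (fun s => finalStatesF income left s.1 s.2) := by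
  intro left
  induction left with
  | nil =>
    intro S
    rw [List.foldl_nil]
    have h1 : S.flatMap (fun s => finalStatesF income [] s.1 s.2) = S.flatMap (fun s => [s]) := by
      apply List.flatMap_congr
      intro s _
      rfl
    rw [h1, List.flatMap_singleton']
  | cons b rest ih =>
    intro S
    rw [List.foldl_cons]
    have hlevel : S.foldl
        (fun ns s =>
          (income.getD b []).foldl
            (fun ns a =>
              let ca := s.1.getD a ""
              let cb := s.1.getD b ""
              if ca ≠ cb then ns ++ [(relabel s.1 ca cb, s.2 ++ [strAdd a b])] else ns)
            ns)
        [] = S.flatMap (stepB income b) := by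
      have := PySem.List.foldl_congr_mem
        (l := S) (init := ([] : List (PySem.Dict String String × List String)))
        (f := fun ns s =>
          (income.getD b []).foldl
            (fun ns a =>
              let ca := s.1.getD a ""
              let cb := s.1.getD b ""
              if ca ≠ cb then ns ++ [(relabel s.1 ca cb, s.2 ++ [strAdd a b])] else ns)
            ns)
        (g := fun ns s => ns ++ stepB income b s)
        (fun ns s _ => innerB_eq income b s ns)
      rw [this, PySem.List.foldl_append_eq_flatMap]
      simp
    rw [hlevel, ih, List.flatMap_assoc]
    apply List.flatMap_congr
    intro s _
    rfl

theorem mapSnd_final (income : PySem.Dict String (List String)) :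
    ∀ (left : List String) (c : PySem.Dict String String) (e : List String),
      (finalStatesF income left c e).map (fun s => s.2) = leavesF income left c e := by
  intro left
  induction left with
  | nil => intro c e; rfl
  | cons b rest ih =>
    intro c e
    rw [show finalStatesF income (b :: rest) c e
        = (stepB income b (c, e)).flatMap (fun s => finalStatesF income rest s.1 s.2) from rfl]
    rw [List.map_flatMap]
    have h1 : (stepB income b (c, e)).flatMap
        (fun s => (finalStatesF income rest s.1 s.2).map (fun s => s.2))
        = (stepB income b (c, e)).flatMap (fun s => leavesF income rest s.1 s.2) := by
      apply List.flatMap_congr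
      intro s _
      exact ih s.1 s.2
    rw [h1, stepB, List.flatMap_assoc]
    rw [show leavesF income (b :: rest) c e
        = (income.getD b []).flatMap (fun a =>
            if c.getD a "" ≠ c.getD b "" then
              leavesF income rest (relabel c (c.getD a "") (c.getD b "")) (e ++ [strAdd a b])
            else []) from rfl]
    apply List.flatMap_congr
    intro a _
    by_cases h : c.getD a "" ≠ c.getD b ""
    · rw [if_pos h, if_pos h, List.flatMap_cons, List.flatMap_nil, List.append_nil]
    · rw [if_neg h, if_neg h, List.flatMap_nil]

theorem filter_map_snd {κ : Type} (S : List (κ × List String)) (p : List String → Bool) :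
    (S.filter (fun s => p s.2)).map (fun s => s.2) = (S.map (fun s => s.2)).filter p := by
  induction S with
  | nil => rfl
  | cons s rest ih =>
    by_cases h : p s.2 = true
    · simp [h, ih]
    · rw [Bool.not_eq_true] at h
      simp [h, ih]

theorem foldl_opt_last {β : Type} (F : String → Option β) (v : String → β) :
    ∀ (L : List String), (∀ x ∈ L, F x = some (v x)) → ∀ (hne : L ≠ []) (init : β),
      L.foldl (fun res r => match F r with | some r' => r' | none => res) init
        = v (L.getLast hne) := by
  intro L
  induction L with
  | nil => intro _ hne; cases hne rfl
  | cons x xs ih =>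
    intro h hne init
    rw [List.foldl_cons]
    have hred : (match F x with | some r' => r' | none => init) = v x := by
      rw [h x List.mem_cons_self]
    rw [hred]
    cases xs with
    | nil => simp
    | cons y ys =>
      rw [ih (fun z hz => h z (List.mem_cons_of_mem _ hz)) (List.cons_ne_nil _ _)]
      congr 1

theorem len_one_char {s : String} (h : s.toList.length = 1) : ∃ c, s.toList = [c] := by
  cases hs : s.toList with
  | nil => rw [hs] at h; simp at h
  | cons c rest =>
    rw [hs] at h
    simp at h
    exact ⟨c, by rw [h]⟩

theorem seek_eq_aux (l : List (String × String)) (hpre : Pre_seek_subtree l) :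
    seek_subtree l = seek_subtree_alt l := by
  simp only [seek_subtree, seek_subtree_alt]
  set nodes := (parse_graph l).1 with hnodes
  set income := (parse_graph l).2.1 with hincome
  have hnodes' : nodes = PySem.List.dedup (l.flatMap fun p => [p.1, p.2]) := parse_nodes l
  have hincome' : income = l.foldl stepI PySem.Dict.empty := by
    rw [hincome, parse_eq]
  set srcs := nodes.filter (fun i => !(income.contains i)) with hsrcs
  have hflt : srcs
      = (PySem.List.dedup (l.flatMap fun p => [p.1, p.2])).filter
          (fun n => !(decide (n ∈ l.map Prod.snd))) := by
    rw [hsrcs, hnodes']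
    apply List.filter_congr
    intro x _
    rw [hincome', income_contains]
  by_cases hlen : srcs.length > 1
  · rw [if_pos hlen, if_pos hlen]
  rw [if_neg hlen, if_neg hlen]
  have hpre2 : (∀ p ∈ l, p.1.toList.length = 1 ∧ p.2.toList.length = 1) ∧
      (PySem.List.dedup (l.flatMap fun p => [p.1, p.2])).length ≠ 1 := by
    rcases hpre with h | h
    · exact absurd (by rw [hflt]; exact h) hlen
    · exact h
  have hone : ∀ n ∈ nodes, ∃ c, n.toList = [c] := by
    intro n hn
    rw [hnodes'] at hn
    obtain ⟨p, hp, hnp⟩ := List.mem_flatMap.mp ((PySem.List.mem_dedup _ _).mp hn)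
    rcases List.mem_cons.mp hnp with rfl | hnp'
    · exact len_one_char (hpre2.1 p hp).1
    · rw [List.mem_singleton.mp hnp']
      exact len_one_char (hpre2.1 p hp).2
  have hnsnd : nodes.Nodup := by
    rw [hnodes']
    exact PySem.List.nodup_dedup _
  have hinc : ∀ b x : String, x ∈ income.getD b [] → x ∈ nodes := by
    intro b x hx
    rw [hincome'] at hx
    rcases income_mem l PySem.Dict.empty b x hx with h | h
    · rw [PySem.Dict.getD_empty] at h
      cases h
    · rw [hnodes', PySem.List.mem_dedup]
      exact List.mem_flatMap.mpr ⟨(x, b), h, List.mem_cons_self⟩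
  by_cases hnil : nodes = []
  · -- A: srcs = [], possible_roots := nodes = [], fold over [] gives []
    rw [if_pos hnil]
    have hs0 : srcs = [] := by rw [hsrcs, hnil]; rfl
    rw [hs0]
    simp [hnil]
  · rw [if_neg hnil]
    have hlen2 : 2 ≤ nodes.length := by
      have h0 : nodes.length ≠ 0 := fun h => hnil (List.length_eq_zero_iff.mp h)
      have h1 : nodes.length ≠ 1 := by rw [hnodes']; exact hpre2.2
      omega
    -- for every root, the sorted non-root list is nonempty and the search is characterized
    have horder_ne : ∀ root : String,
        PySem.List.sorted (nodes.filter (fun i => decide (i ≠ root)))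
          (fun i => ((income.getD i []).length : Int)) false ≠ [] := by
      intro root
      rw [Ne, PySem.List.sorted_eq_nil_iff]
      intro hf
      have : ∀ x ∈ nodes, x = root := by
        intro x hx
        by_contra hxr
        have : x ∈ nodes.filter (fun i => decide (i ≠ root)) :=
          List.mem_filter.mpr ⟨hx, by simpa using hxr⟩
        rw [hf] at this
        cases this
      cases hn : nodes with
      | nil => exact hnil hn
      | cons n0 ns =>
        cases hn2 : ns with
        | nil => rw [hn, hn2] at hlen2; simp at hlen2
        | cons n1 ns' =>
          have e0 : n0 = root := this n0 (by rw [hn]; exact List.mem_cons_self)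
          have e1 : n1 = root := this n1 (by
            rw [hn, hn2]; exact List.mem_cons_of_mem _ List.mem_cons_self)
          have : nodes.Nodup := hnsnd
          rw [hn, hn2] at this
          exact (List.nodup_cons.mp this).1 (by rw [e0, ← e1]; exact List.mem_cons_self)
    set comp0 := nodes.foldl (fun d n => d.insert n n) PySem.Dict.empty with hcomp0
    have hchar : ∀ root : String,
        visitA income root
          (PySem.List.sorted (nodes.filter (fun i => decide (i ≠ root)))
            (fun i => ((income.getD i []).length : Int)) false) nodes []
        = some ((leavesF income
            (PySem.List.sorted (nodes.filter (fun i => decide (i ≠ root)))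
              (fun i => ((income.getD i []).length : Int)) false) comp0 []).filter
            (fun e => is_tree e root)) := by
      intro root
      apply visitA_char income root nodes hone hnsnd hinc _ nodes comp0 []
      · intro n hn
        have := (PySem.List.mem_sorted _ _ _ _).mp hn
        exact (List.mem_filter.mp this).1
      · exact init_inv nodes hone hnsnd
      · exact horder_ne root
    -- the A-side fold keeps only the last root's result
    have hA : ∀ (L : List String) (hne : L ≠ []),
        L.foldl (fun res root =>
          match visitA income root
            (PySem.List.sorted (nodes.filter (fun i => decide (i ≠ root)))
              (fun i => ((income.getD i []).length : Int)) false) nodes [] with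
          | some r => r
          | none => res) []
        = ((leavesF income
            (PySem.List.sorted (nodes.filter (fun i => decide (i ≠ L.getLast hne)))
              (fun i => ((income.getD i []).length : Int)) false) comp0 []).filter
            (fun e => is_tree e (L.getLast hne))) := by
      intro L hne
      have h0 := foldl_opt_last
        (fun root => visitA income root
          (PySem.List.sorted (nodes.filter (fun i => decide (i ≠ root)))
            (fun i => ((income.getD i []).length : Int)) false) nodes [])
        (fun root => ((leavesF income
            (PySem.List.sorted (nodes.filter (fun i => decide (i ≠ root)))
              (fun i => ((income.getD i []).length : Int)) false) comp0 []).filter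
            (fun e => is_tree e root)))
        L (fun x _ => hchar x) hne []
      convert h0 using 2
      funext res root
      cases visitA income root
        (PySem.List.sorted (nodes.filter (fun i => decide (i ≠ root)))
          (fun i => ((income.getD i []).length : Int)) false) nodes [] <;> rfl
    -- the B side for a fixed root
    have hB : ∀ root : String,
        (((PySem.List.sorted (nodes.filter (fun i => decide (i ≠ root)))
            (fun i => ((income.getD i []).length : Int)) false).foldl
          (fun states b =>
            states.foldl
              (fun ns s =>
                (income.getD b []).foldl
                  (fun ns a =>
                    let ca := s.1.getD a ""
                    let cb := s.1.getD b ""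
                    if ca ≠ cb then ns ++ [(relabel s.1 ca cb, s.2 ++ [strAdd a b])] else ns)
                  ns)
              [])
          [(comp0, [])]).foldl
            (fun res s => if is_tree s.2 root then res ++ [s.2] else res) [])
        = ((leavesF income
            (PySem.List.sorted (nodes.filter (fun i => decide (i ≠ root)))
              (fun i => ((income.getD i []).length : Int)) false) comp0 []).filter
            (fun e => is_tree e root)) := by
      intro root
      rw [foldLevels]
      rw [show ([(comp0, ([] : List String))].flatMap
          (fun s => finalStatesF income
            (PySem.List.sorted (nodes.filter (fun i => decide (i ≠ root)))
              (fun i => ((income.getD i []).length : Int)) false) s.1 s.2))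
        = finalStatesF income
            (PySem.List.sorted (nodes.filter (fun i => decide (i ≠ root)))
              (fun i => ((income.getD i []).length : Int)) false) comp0 [] by
        rw [List.flatMap_cons, List.flatMap_nil, List.append_nil]]
      rw [PySem.List.foldl_append_if
        (p := fun s : PySem.Dict String String × List String => is_tree s.2 root)
        (f := fun s => s.2)]
      rw [List.nil_append, filter_map_snd _ (fun e => is_tree e root), mapSnd_final]
    -- identify the effective root
    by_cases hz : srcs.length = 0
    · rw [if_pos hz, if_pos hz, hA nodes hnil, hB]
      have : nodes.getLastD "" = nodes.getLast hnil := by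
        rw [List.getLastD_eq_getLast?, List.getLast?_eq_getLast_of_ne_nil hnil]
        rfl
      rw [this]
    · rw [if_neg hz, if_neg hz]
      have hs1 : srcs.length = 1 := by omega
      obtain ⟨s0, hs0⟩ := List.length_eq_one_iff.mp hs1
      rw [hs0, hA [s0] (List.cons_ne_nil _ _), hB]
      rfl

-- ===== VERDICT (by name: the statement is the Claim_ definition above) =====
theorem seek_subtree_spec : Claim_equal_seek_subtree := by
  intro l _hdom hpre
  exact seek_eq_aux l hpre
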